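-- pv_equiv track=rewrite | github.com/blast-cu/econ-indicators | data-utils/get_annotation_stats.py | get_agreed_anns
-- ===== SOURCE A (Python) =====
-- from collections import Counter
--
-- def get_agreed_anns(ann_dict: dict):
--     """
--     Takes a nested dictionary of annotations (list) and returns
--     nested dictionary of final annotations (str) wrt full agreement
--     """
--
--     for id in ann_dict.keys():
--         curr_ent = ann_dict[id]
--         # TODO: for quant anns, check type before subtypes
--         for type in curr_ent.keys():
--             curr_t = curr_ent[type]
--             result = '\0'
--
--             if len(curr_t) >= 2:  # 2 or more annotations
--                 anns = [a[1] for a in curr_t]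
--                 c = Counter(anns).most_common()
--
--                 # check for tie (first result count matches second)
--                 if len(c) == 1 or c[0][1] != c[1][1]:
--                     result = c[0][0]
--
--             ann_dict[id][type] = result
--
--     return ann_dict
-- ===== SOURCE B (Python) =====
-- def get_agreed_anns(ann_dict: dict):
--     """
--     Takes a nested dictionary of annotations (list) and returns
--     nested dictionary of final annotations (str) wrt full agreement
--     """
--     for id in ann_dict:
--         curr_ent = ann_dict[id]
--         for type in curr_ent:
--             entries = curr_ent[type]
--             result = '\0'
--             if len(entries) >= 2:
--                 # sort the annotation values so equal values are adjacent,
--                 # then scan the runs: longest run wins unless runs tie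
--                 vals = sorted(a[1] for a in entries)
--                 best_v, best_n, tie = '\0', 0, True
--                 i, n = 0, len(vals)
--                 while i < n:
--                     j = i + 1
--                     while j < n and vals[j] == vals[i]:
--                         j += 1
--                     if j - i > best_n:
--                         best_v, best_n, tie = vals[i], j - i, False
--                     elif j - i == best_n:
--                         tie = True
--                     i = j
--                 if not tie:
--                     result = best_v
--             curr_ent[type] = result
--     return ann_dict
-- ===== Notes on version B (the rewrite author's own statement) =====
-- stated objective: alternative
-- what changed: Per leaf, B drops Counter/most_common and any counting dict entirely: it sorts the annotation values so equal values become adjacent, then makes one run-length scan over the sorted list keeping the longest run and a tie flag, assigning the run's value only when the longest run is unique.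
import Mathlib
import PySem

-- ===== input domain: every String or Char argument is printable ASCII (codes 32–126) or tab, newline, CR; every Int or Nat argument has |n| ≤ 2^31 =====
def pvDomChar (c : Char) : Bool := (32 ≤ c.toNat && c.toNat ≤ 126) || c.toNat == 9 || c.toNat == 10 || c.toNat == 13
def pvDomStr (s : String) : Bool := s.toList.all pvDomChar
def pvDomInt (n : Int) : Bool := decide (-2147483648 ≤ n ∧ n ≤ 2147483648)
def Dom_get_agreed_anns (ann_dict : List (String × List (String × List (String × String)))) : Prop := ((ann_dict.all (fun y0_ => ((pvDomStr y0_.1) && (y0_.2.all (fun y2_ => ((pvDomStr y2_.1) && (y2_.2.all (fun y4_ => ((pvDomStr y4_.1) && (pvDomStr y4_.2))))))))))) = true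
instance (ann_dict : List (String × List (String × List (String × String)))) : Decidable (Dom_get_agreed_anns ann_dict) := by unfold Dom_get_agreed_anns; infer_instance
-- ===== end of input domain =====

-- B drops Counter entirely: per leaf it sorts the annotation values and makes one run-length
-- scan over the sorted list (longest run wins unless runs tie); the '\0' sentinel and the
-- nested traversal are kept. (Both Pythons mutate the argument in place and return it;
-- the theorem is about the return value.)

-- ===== PORT A =====
-- per-leaf body of A's inner loop (Counter + most_common + tie check)
def pvLeafA (curr_t : List (String × String)) : String :=
  let result := "\x00"
  if 2 ≤ curr_t.length then
    let anns := curr_t.map (fun a => a.2)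
    let c := PySem.List.sorted (PySem.Dict.items (PySem.Dict.counter anns)) (fun x => x.2) true
    -- 'if len(c) == 1 or c[0][1] != c[1][1]: result = c[0][0]' (c is nonempty here)
    match c with
    | [] => result
    | [p] => p.1
    | p :: q :: _ => if p.2 ≠ q.2 then p.1 else result
  else result

def get_agreed_anns (ann_dict : List (String × List (String × List (String × String)))) : List (String × List (String × String)) :=
  ann_dict.map (fun e => (e.1, e.2.map (fun t => (t.1, pvLeafA t.2))))

-- ===== PORT B =====
-- B's while loops: each step consumes one run of equal adjacent values of the sorted list
-- (inner 'while vals[j] == vals[i]' = takeWhile/dropWhile) and updates (best_v, best_n, tie)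
def pvScanB (vals : List String) (best_v : String) (best_n : Int) (tie : Bool) : String × Int × Bool :=
  match vals with
  | [] => (best_v, best_n, tie)
  | v :: t =>
    let run : Int := 1 + (t.takeWhile (fun w => w == v)).length
    let rest := t.dropWhile (fun w => w == v)
    if best_n < run then pvScanB rest v run false
    else if run = best_n then pvScanB rest best_v best_n true
    else pvScanB rest best_v best_n tie
termination_by vals.length
decreasing_by
  all_goals simpa using Nat.lt_succ_of_le (List.length_dropWhile_le (fun w => w == v) t)

-- per-leaf body of B's inner loop (sort values, run-length scan)
def pvLeafB (entries : List (String × String)) : String :=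
  if 2 ≤ entries.length then
    let vals := PySem.List.sorted (entries.map (fun a => a.2)) (fun x => x) false
    let s := pvScanB vals "\x00" 0 true
    if s.2.2 then "\x00" else s.1
  else "\x00"

def get_agreed_anns_alt (ann_dict : List (String × List (String × List (String × String)))) : List (String × List (String × String)) :=
  ann_dict.map (fun e => (e.1, e.2.map (fun t => (t.1, pvLeafB t.2))))

-- ===== PRECONDITION & SPEC =====
def Spec_get_agreed_anns (ann_dict : List (String × List (String × List (String × String)))) (out : List (String × List (String × String))) : Prop := out = get_agreed_anns_alt ann_dict
instance (ann_dict : List (String × List (String × List (String × String)))) (out : List (String × List (String × String))) : Decidable (Spec_get_agreed_anns ann_dict out) := by unfold Spec_get_agreed_anns; infer_instance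

-- ===== CLAIM (what is proved, stated in full; the proofs are below) =====
def Claim_equal_get_agreed_anns : Prop := ∀ (ann_dict : List (String × List (String × List (String × String)))), Dom_get_agreed_anns ann_dict → Spec_get_agreed_anns ann_dict (get_agreed_anns ann_dict)

-- ===== LEMMAS AND PROOFS =====

-- the run decomposition B's outer while loop walks through: (value, run length) per run
def pvRuns (vals : List String) : List (String × Int) :=
  match vals with
  | [] => []
  | v :: t =>
    (v, 1 + ((t.takeWhile (fun w => w == v)).length : Int)) ::
      pvRuns (t.dropWhile (fun w => w == v))
termination_by vals.length
decreasing_by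
  all_goals simpa using Nat.lt_succ_of_le (List.length_dropWhile_le (fun w => w == v) t)

-- one step of B's state update, abstracted over a (value, run length) pair
def pvStep2 (st : String × Int × Bool) (vn : String × Int) : String × Int × Bool :=
  if st.2.1 < vn.2 then (vn.1, vn.2, false)
  else if vn.2 = st.2.1 then (st.1, st.2.1, true)
  else st

theorem scanB_eq_foldl : ∀ (N : Nat) (vals : List String), vals.length ≤ N →
    ∀ (b : String) (n : Int) (t : Bool),
    pvScanB vals b n t = (pvRuns vals).foldl pvStep2 (b, n, t) := by
  intro N
  induction N with
  | zero =>
    intro vals hl b n t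
    have : vals = [] := List.eq_nil_of_length_eq_zero (by omega)
    subst this
    rw [pvScanB, pvRuns]
    rfl
  | succ N ih =>
    intro vals hl b n t
    match vals with
    | [] => rw [pvScanB, pvRuns]; rfl
    | v :: t' =>
      have hlen : (t'.dropWhile (fun w => w == v)).length ≤ N := by
        have := List.length_dropWhile_le (fun w => w == v) t'
        simp at hl
        omega
      simp only [pvScanB, pvRuns, List.foldl_cons, pvStep2]
      by_cases h1 : n < 1 + ((t'.takeWhile (fun w => w == v)).length : Int)
      · simp only [if_pos h1]
        exact ih _ hlen _ _ _
      · by_cases h2 : 1 + ((t'.takeWhile (fun w => w == v)).length : Int) = n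
        · simp only [if_neg h1, if_pos h2]
          exact ih _ hlen _ _ _
        · simp only [if_neg h1, if_neg h2]
          exact ih _ hlen _ _ _

-- running max of the counts
def pvMax (l : List (String × Int)) (c0 : Int) : Int :=
  l.foldl (fun m x => max m x.2) c0

theorem pvMax_cons (x : String × Int) (t : List (String × Int)) (c0 : Int) :
    pvMax (x :: t) c0 = pvMax t (max c0 x.2) := rfl

theorem pvMax_le_bounds (l : List (String × Int)) (c0 : Int) :
    c0 ≤ pvMax l c0 ∧ ∀ x ∈ l, x.2 ≤ pvMax l c0 :=
  PySem.List.le_foldl_max_int l (fun x => x.2) c0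

theorem pvMax_attained (l : List (String × Int)) (c0 : Int) :
    pvMax l c0 = c0 ∨ ∃ x ∈ l, x.2 = pvMax l c0 := by
  induction l generalizing c0 with
  | nil => exact Or.inl rfl
  | cons x t ih =>
    rw [pvMax_cons]
    rcases ih (max c0 x.2) with h | ⟨y, hy, hy2⟩
    · rcases le_total c0 x.2 with hle | hle
      · exact Or.inr ⟨x, List.mem_cons_self, by rw [h]; omega⟩
      · exact Or.inl (by rw [h]; omega)
    · exact Or.inr ⟨y, List.mem_cons_of_mem _ hy, hy2⟩

theorem pvMax_eq_of_le (l : List (String × Int)) (c0 : Int)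
    (h : ∀ x ∈ l, x.2 ≤ c0) : pvMax l c0 = c0 := by
  induction l generalizing c0 with
  | nil => rfl
  | cons x t ih =>
    rw [pvMax_cons, max_eq_left (h x List.mem_cons_self)]
    exact ih c0 (fun y hy => h y (List.mem_cons_of_mem _ hy))

-- full characterisation of B's scan loop from an arbitrary state
theorem pvScan2_spec (l : List (String × Int)) (b0 : String) (c0 : Int) (t0 : Bool) :
    l.foldl pvStep2 (b0, c0, t0) =
      if ∃ x ∈ l, c0 < x.2 then
        (((l.find? (fun x => x.2 == pvMax l c0)).map (fun x => x.1)).getD b0,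
          pvMax l c0, decide (2 ≤ l.countP (fun x => x.2 == pvMax l c0)))
      else (b0, c0, t0 || decide (1 ≤ l.countP (fun x => x.2 == c0))) := by
  induction l generalizing b0 c0 t0 with
  | nil => simp
  | cons x t ih =>
    rcases lt_trichotomy c0 x.2 with hc | hc | hc
    · -- new strict max: reset state to (x.1, x.2, false)
      have hstep : pvStep2 (b0, c0, t0) x = (x.1, x.2, false) := by
        simp [pvStep2, hc]
      have hM : pvMax (x :: t) c0 = pvMax t x.2 := by
        rw [pvMax_cons, max_eq_right (le_of_lt hc)]
      rw [List.foldl_cons, hstep, ih, hM,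
        if_pos (show ∃ z ∈ x :: t, c0 < z.2 from ⟨x, List.mem_cons_self, hc⟩)]
      by_cases hex : ∃ y ∈ t, x.2 < y.2
      · rcases hex with ⟨y, hy, hy2⟩
        have hxlt : x.2 < pvMax t x.2 := lt_of_lt_of_le hy2 ((pvMax_le_bounds t x.2).2 y hy)
        have hxne : (x.2 == pvMax t x.2) = false := by simp; omega
        rw [if_pos (show ∃ y ∈ t, x.2 < y.2 from ⟨y, hy, hy2⟩)]
        have hsome : (t.find? (fun z => z.2 == pvMax t x.2)).isSome := by
          rcases pvMax_attained t x.2 with h | ⟨z, hz, hz2⟩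
          · omega
          · exact List.find?_isSome.mpr ⟨z, hz, by simp [hz2]⟩
        rcases Option.isSome_iff_exists.mp hsome with ⟨w, hw⟩
        simp [List.find?, List.countP_cons, hxne, hw]
      · push_neg at hex
        have hMx : pvMax t x.2 = x.2 := pvMax_eq_of_le t x.2 hex
        rw [hMx, if_neg (show ¬ ∃ y ∈ t, x.2 < y.2 by
          rintro ⟨y, hy, hy2⟩; exact absurd (hex y hy) (by omega))]
        have hcnt : (2 ≤ (x :: t).countP (fun z => z.2 == x.2)) ↔
            (1 ≤ t.countP (fun z => z.2 == x.2)) := by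
          simp [List.countP_cons]
        simp only [List.find?, show (x.2 == x.2) = true by simp, Option.map_some,
          Option.getD_some, Bool.false_or, decide_eq_decide.mpr hcnt]
        try rfl
    · -- equal: tie := true
      have hstep : pvStep2 (b0, c0, t0) x = (b0, c0, true) := by
        have h1 : ¬ (c0 < x.2) := by omega
        simp [pvStep2, h1, hc.symm]
      have hM : pvMax (x :: t) c0 = pvMax t c0 := by
        rw [pvMax_cons, ← hc, max_self]
      rw [List.foldl_cons, hstep, ih]
      by_cases hex : ∃ y ∈ t, c0 < y.2
      · rcases hex with ⟨y, hy, hy2⟩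
        have hxne : (x.2 == pvMax t c0) = false := by
          have := (pvMax_le_bounds t c0).2 y hy
          simp; omega
        rw [hM, if_pos (show ∃ y ∈ t, c0 < y.2 from ⟨y, hy, hy2⟩),
          if_pos (show ∃ z ∈ x :: t, c0 < z.2 from ⟨y, List.mem_cons_of_mem _ hy, hy2⟩)]
        have hsome : (t.find? (fun z => z.2 == pvMax t c0)).isSome := by
          rcases pvMax_attained t c0 with h | ⟨z, hz, hz2⟩
          · have := (pvMax_le_bounds t c0).2 y hy
            omega
          · exact List.find?_isSome.mpr ⟨z, hz, by simp [hz2]⟩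
        rcases Option.isSome_iff_exists.mp hsome with ⟨w, hw⟩
        simp [List.find?, List.countP_cons, hxne, hw]
      · have hnall : ¬ ∃ y ∈ x :: t, c0 < y.2 := by
          rintro ⟨y, hy, hy2⟩
          rcases List.mem_cons.mp hy with h | h
          · subst h; omega
          · exact hex ⟨y, h, hy2⟩
        rw [if_neg hex, if_neg hnall]
        have hxt : (x.2 == c0) = true := by simp; omega
        simp [List.countP_cons, hxt]
    · -- smaller: state unchanged
      have hstep : pvStep2 (b0, c0, t0) x = (b0, c0, t0) := by
        have h1 : ¬ (c0 < x.2) := by omega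
        have h2 : ¬ (x.2 = c0) := by omega
        simp [pvStep2, h1, h2]
      have hM : pvMax (x :: t) c0 = pvMax t c0 := by
        rw [pvMax_cons, max_eq_left (le_of_lt hc)]
      rw [List.foldl_cons, hstep, ih]
      by_cases hex : ∃ y ∈ t, c0 < y.2
      · rcases hex with ⟨y, hy, hy2⟩
        have hxne : (x.2 == pvMax t c0) = false := by
          have := (pvMax_le_bounds t c0).2 y hy
          simp; omega
        rw [hM, if_pos (show ∃ y ∈ t, c0 < y.2 from ⟨y, hy, hy2⟩),
          if_pos (show ∃ z ∈ x :: t, c0 < z.2 from ⟨y, List.mem_cons_of_mem _ hy, hy2⟩)]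
        have hsome : (t.find? (fun z => z.2 == pvMax t c0)).isSome := by
          rcases pvMax_attained t c0 with h | ⟨z, hz, hz2⟩
          · have := (pvMax_le_bounds t c0).2 y hy
            omega
          · exact List.find?_isSome.mpr ⟨z, hz, by simp [hz2]⟩
        rcases Option.isSome_iff_exists.mp hsome with ⟨w, hw⟩
        simp [List.find?, List.countP_cons, hxne, hw]
      · have hnall : ¬ ∃ y ∈ x :: t, c0 < y.2 := by
          rintro ⟨y, hy, hy2⟩
          rcases List.mem_cons.mp hy with h | h
          · subst h; omega
          · exact hex ⟨y, h, hy2⟩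
        rw [if_neg hex, if_neg hnall]
        have hxf : (x.2 == c0) = false := by simp; omega
        have hcc : List.countP (fun z => z.2 == c0) (x :: t) = List.countP (fun z => z.2 == c0) t := by
          simp [List.countP_cons, hxf]
        rw [hcc]

-- the order-independent result both leaves compute from a (value, count) item list
def pvOut (items : List (String × Int)) : String :=
  if 2 ≤ items.countP (fun x => x.2 == pvMax items 0) then "\x00"
  else ((items.find? (fun x => x.2 == pvMax items 0)).map (fun x => x.1)).getD "\x00"

-- two distinct members satisfying a predicate give countP ≥ 2
theorem two_le_countP {l : List (String × Int)} {p : String × Int → Bool}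
    {a b : String × Int} (ha : a ∈ l) (hb : b ∈ l) (hab : a ≠ b)
    (hpa : p a = true) (hpb : p b = true) : 2 ≤ l.countP p := by
  have ha' : a ∈ l.filter p := List.mem_filter.mpr ⟨ha, hpa⟩
  have hb' : b ∈ l.filter p := List.mem_filter.mpr ⟨hb, hpb⟩
  have hbe : b ∈ (l.filter p).erase a := (List.mem_erase_of_ne (Ne.symm hab)).mpr hb'
  have h1 : 1 ≤ ((l.filter p).erase a).length := List.length_pos_of_mem hbe
  have h2 : ((l.filter p).erase a).length = (l.filter p).length - 1 :=
    List.length_erase_of_mem ha'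
  have h3 : 1 ≤ (l.filter p).length := List.length_pos_of_mem ha'
  rw [List.countP_eq_length_filter]
  omega

-- pvOut only depends on the multiset of items
theorem pvMax_perm {l₁ l₂ : List (String × Int)} (h : l₁.Perm l₂) (c0 : Int) :
    pvMax l₁ c0 = pvMax l₂ c0 := by
  unfold pvMax
  exact h.foldl_eq' (fun x _ y _ z => by simp [max_assoc, max_comm x.2 y.2]) c0

theorem pvOut_perm {l₁ l₂ : List (String × Int)} (h : l₁.Perm l₂) :
    pvOut l₁ = pvOut l₂ := by
  unfold pvOut
  have hM := pvMax_perm h 0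
  rw [hM, h.countP_eq (fun x => x.2 == pvMax l₂ 0)]
  by_cases h2 : 2 ≤ l₂.countP (fun x => x.2 == pvMax l₂ 0)
  · simp [h2]
  · rw [if_neg h2, if_neg h2]
    by_cases h1 : 1 ≤ l₂.countP (fun x => x.2 == pvMax l₂ 0)
    · -- exactly one satisfying element in each: they are the same element
      have hsome₂ : (l₂.find? (fun x => x.2 == pvMax l₂ 0)).isSome := by
        have hpos : 0 < l₂.countP (fun x => x.2 == pvMax l₂ 0) := h1
        rcases List.countP_pos_iff.mp hpos with ⟨z, hz, hzp⟩
        exact List.find?_isSome.mpr ⟨z, hz, hzp⟩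
      have hsome₁ : (l₁.find? (fun x => x.2 == pvMax l₂ 0)).isSome := by
        rcases Option.isSome_iff_exists.mp hsome₂ with ⟨w, hw⟩
        exact List.find?_isSome.mpr
          ⟨w, h.mem_iff.mpr (List.mem_of_find?_eq_some hw),
            List.find?_some (p := fun x : String × Int => x.2 == pvMax l₂ 0) hw⟩
      rcases Option.isSome_iff_exists.mp hsome₁ with ⟨w₁, hw₁⟩
      rcases Option.isSome_iff_exists.mp hsome₂ with ⟨w₂, hw₂⟩
      have hm₁ : w₁ ∈ l₂ := h.mem_iff.mp (List.mem_of_find?_eq_some hw₁)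
      have hm₂ : w₂ ∈ l₂ := List.mem_of_find?_eq_some hw₂
      have heq : w₁ = w₂ := by
        by_contra hne
        have := two_le_countP (p := fun x : String × Int => x.2 == pvMax l₂ 0) hm₁ hm₂ hne
          (List.find?_some (p := fun x : String × Int => x.2 == pvMax l₂ 0) hw₁)
          (List.find?_some (p := fun x : String × Int => x.2 == pvMax l₂ 0) hw₂)
        omega
      simp [hw₁, hw₂, heq]
    · have h0 : l₂.countP (fun x => x.2 == pvMax l₂ 0) = 0 := by omega
      have hn₂ : l₂.find? (fun x => x.2 == pvMax l₂ 0) = none :=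
        List.find?_eq_none.mpr (fun z hz => by
          have := List.countP_eq_zero.mp h0 z hz; simp_all)
      have hn₁ : l₁.find? (fun x => x.2 == pvMax l₂ 0) = none :=
        List.find?_eq_none.mpr (fun z hz => by
          have := List.countP_eq_zero.mp h0 z (h.mem_iff.mp hz); simp_all)
      simp [hn₁, hn₂]

-- A's head-of-most_common with tie check computes pvOut of the counter items
theorem leafA_core (items : List (String × Int)) (hne : items ≠ [])
    (hpos : ∀ x ∈ items, 0 < x.2) :
    (match PySem.List.sorted items (fun x => x.2) true with
      | [] => "\x00"
      | [p] => p.1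
      | p :: q :: _ => if p.2 ≠ q.2 then p.1 else "\x00")
    = pvOut items := by
  have hperm : (PySem.List.sorted items (fun x => x.2) true).Perm items :=
    PySem.List.sorted_perm items (fun x => x.2) true
  set M := pvMax items 0 with hMdef
  rcases hc : PySem.List.sorted items (fun x => x.2) true with _ | ⟨p, rest⟩
  · exact absurd ((PySem.List.sorted_eq_nil_iff items (fun x => x.2) true).mp hc) hne
  · have hpm : p ∈ items := hperm.mem_iff.mp (hc ▸ List.mem_cons_self)
    have hhead : ∀ y ∈ items, y.2 ≤ p.2 :=
      PySem.List.key_head_sorted_rev_ge items (fun x => x.2) hc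
    have hpM : p.2 = M := by
      have h1 : p.2 ≤ M := (pvMax_le_bounds items 0).2 p hpm
      have h2 : M ≤ p.2 := by
        rcases pvMax_attained items 0 with h | ⟨z, hz, hz2⟩
        · have := hpos p hpm; omega
        · have := hhead z hz; omega
      omega
    have hcountperm : (PySem.List.sorted items (fun x => x.2) true).countP
        (fun x => x.2 == M) = items.countP (fun x => x.2 == M) :=
      hperm.countP_eq _
    rcases rest with _ | ⟨q, rest2⟩
    · -- singleton: unique max
      have hcount : items.countP (fun x => x.2 == M) = 1 := by
        rw [← hcountperm, hc]; simp [hpM]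
      have hfind : (items.find? (fun x => x.2 == M)).isSome :=
        List.find?_isSome.mpr ⟨p, hpm, by simp [hpM]⟩
      rcases Option.isSome_iff_exists.mp hfind with ⟨w, hw⟩
      have hwmem := List.mem_of_find?_eq_some hw
      have hwp := List.find?_some hw
      have hwpeq : w = p := by
        by_contra hne2
        have := two_le_countP (p := fun x => x.2 == M) hwmem hpm hne2 hwp (by simp [hpM])
        omega
      unfold pvOut
      rw [← hMdef, if_neg (by omega)]
      simp [hw, hwpeq]
    · have hqm : q ∈ items := hperm.mem_iff.mp (hc ▸ List.mem_cons_of_mem _ List.mem_cons_self)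
      by_cases hpq : p.2 ≠ q.2
      · -- strict head: unique max
        have hqlt : q.2 < M := by
          have := hhead q hqm; omega
        have hpair : (PySem.List.sorted items (fun x => x.2) true).Pairwise
            (fun a b => b.2 ≤ a.2) :=
          PySem.List.sorted_pairwise_rev items (fun x => x.2)
        have hrest : ∀ y ∈ rest2, y.2 < M := by
          intro y hy
          have : y.2 ≤ q.2 := by
            rw [hc] at hpair
            exact ((List.pairwise_cons.mp (List.pairwise_cons.mp hpair).2).1 y hy)
          omega
        have hcount : items.countP (fun x => x.2 == M) = 1 := by
          rw [← hcountperm, hc]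
          simp only [List.countP_cons]
          have h0 : List.countP (fun x : String × Int => x.2 == M) rest2 = 0 :=
            List.countP_eq_zero.mpr (by
              intro y hy
              have := hrest y hy; simp; omega)
          have h1 : ((fun x : String × Int => x.2 == M) q) = false := by simp; omega
          have h2 : ((fun x : String × Int => x.2 == M) p) = true := by simp [hpM]
          simp [h0, h1, h2]
        have hfind : (items.find? (fun x => x.2 == M)).isSome :=
          List.find?_isSome.mpr ⟨p, hpm, by simp [hpM]⟩
        rcases Option.isSome_iff_exists.mp hfind with ⟨w, hw⟩
        have hwmem := List.mem_of_find?_eq_some hw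
        have hwp := List.find?_some hw
        have hwpeq : w = p := by
          by_contra hne2
          have := two_le_countP (p := fun x => x.2 == M) hwmem hpm hne2 hwp (by simp [hpM])
          omega
        unfold pvOut
        rw [← hMdef, if_neg (by omega)]
        simp [hpq, hw, hwpeq]
      · -- tie at the top: count ≥ 2
        push_neg at hpq
        have hqM : q.2 = M := by omega
        have hcount : 2 ≤ items.countP (fun x => x.2 == M) := by
          rw [← hcountperm, hc]
          simp only [List.countP_cons]
          have h1 : ((fun x : String × Int => x.2 == M) p) = true := by simp [hpM]
          have h2 : ((fun x : String × Int => x.2 == M) q) = true := by simp [h1, hqM]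
          simp [h1, h2]
        unfold pvOut
        rw [← hMdef, if_pos hcount]
        simp [hpq]

-- facts about the run decomposition of a sorted list:
-- each run is (value, its count in the list), run values are distinct and exhaust the list
theorem runs_facts : ∀ (N : Nat) (l : List String), l.length ≤ N → l.Pairwise (· ≤ ·) →
    (∀ x ∈ pvRuns l, x.2 = (l.count x.1 : Int) ∧ x.1 ∈ l) ∧
    ((pvRuns l).map Prod.fst).Nodup ∧
    (∀ v ∈ l, v ∈ (pvRuns l).map Prod.fst) := by
  intro N
  induction N with
  | zero =>
    intro l hl _
    have : l = [] := List.eq_nil_of_length_eq_zero (by omega)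
    subst this
    simp [pvRuns]
  | succ N ih =>
    intro l hl hs
    match l with
    | [] => simp [pvRuns]
    | v :: t =>
      have hvle : ∀ y ∈ t, v ≤ y := (List.pairwise_cons.mp hs).1
      have hts : t.Pairwise (· ≤ ·) := (List.pairwise_cons.mp hs).2
      set tw := t.takeWhile (fun w => w == v) with htw
      set rest := t.dropWhile (fun w => w == v) with hrest
      have htweq : ∀ w ∈ tw, w = v := by
        intro w hw
        have := List.mem_takeWhile_imp hw
        simpa using this
      have hsplit : tw ++ rest = t := List.takeWhile_append_dropWhile
      have hrs : rest.Pairwise (· ≤ ·) :=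
        hts.sublist (List.dropWhile_sublist _)
      have hrgt : ∀ y ∈ rest, v < y := by
        match hr : rest with
        | [] => simp
        | r :: rt =>
          have hrmem : ∀ y ∈ r :: rt, y ∈ t := by
            intro y hy
            rw [← hsplit]
            exact List.mem_append_right _ (hr ▸ hy)
          have hrne : r ≠ v := by
            have := List.head?_dropWhile_not (fun w => w == v) t
            rw [← hrest] at this
            simpa using this
          have hrv : v < r := lt_of_le_of_ne (hvle r (hrmem r List.mem_cons_self)) (Ne.symm hrne)
          intro y hy
          rcases List.mem_cons.mp hy with h | h
          · subst h; exact hrv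
          · have : r ≤ y := (List.pairwise_cons.mp (hr ▸ hrs)).1 y h
            exact lt_of_lt_of_le hrv this
      have hvnr : v ∉ rest := fun h => absurd (hrgt v h) (lt_irrefl v)
      have hcountv : (v :: t).count v = 1 + tw.length := by
        have h1 : tw.count v = tw.length :=
          List.count_eq_length.mpr (fun b hb => (htweq b hb).symm)
        have h2 : rest.count v = 0 := List.count_eq_zero.mpr hvnr
        rw [List.count_cons_self, ← hsplit, List.count_append, h1, h2]
        omega
      have hlen : rest.length ≤ N := by
        show (t.dropWhile (fun w => w == v)).length ≤ N
        have h1 := List.length_dropWhile_le (fun w => w == v) t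
        have h2 : (v :: t).length = t.length + 1 := List.length_cons
        omega
      obtain ⟨ihA, ihB, ihC⟩ := ih rest hlen hrs
      have hruns : pvRuns (v :: t) = (v, 1 + (tw.length : Int)) :: pvRuns rest := by
        rw [pvRuns]
      refine ⟨?_, ?_, ?_⟩
      · intro x hx
        rw [hruns] at hx
        rcases List.mem_cons.mp hx with h | h
        · subst h
          constructor
          · simp [hcountv]
          · exact List.mem_cons_self
        · obtain ⟨hx2, hx1⟩ := ihA x h
          have hxne : x.1 ≠ v := fun he => absurd (he ▸ hrgt x.1 hx1) (lt_irrefl v)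
          have hcnt : (v :: t).count x.1 = rest.count x.1 := by
            have h1 : tw.count x.1 = 0 :=
              List.count_eq_zero.mpr (fun hmem => hxne (htweq _ hmem))
            rw [List.count_cons_of_ne (by exact fun he => hxne he.symm), ← hsplit,
              List.count_append, h1]
            omega
          refine ⟨by rw [hcnt]; exact hx2, ?_⟩
          · exact List.mem_cons_of_mem _ (by rw [← hsplit]; exact List.mem_append_right _ hx1)
      · rw [hruns]
        simp only [List.map_cons]
        refine List.Nodup.cons ?_ ihB
        intro hmem
        rcases List.mem_map.mp hmem with ⟨x, hx, hx1⟩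
        exact hvnr (hx1 ▸ (ihA x hx).2)
      · intro w hw
        rw [hruns]
        simp only [List.map_cons]
        rcases List.mem_cons.mp hw with h | h
        · subst h; exact List.mem_cons_self
        · rw [← hsplit] at h
          rcases List.mem_append.mp h with h | h
          · rw [htweq w h]; exact List.mem_cons_self
          · exact List.mem_cons_of_mem _ (ihC w h)

-- Counter(anns).items is a permutation of the runs of sorted(anns)
theorem items_perm_runs (anns : List String) :
    (PySem.Dict.items (PySem.Dict.counter anns)).Perm
      (pvRuns (PySem.List.sorted anns (fun x => x) false)) := by
  set vals := PySem.List.sorted anns (fun x => x) false with hvals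
  have hsp : vals.Perm anns := PySem.List.sorted_perm anns (fun x => x) false
  have hs : vals.Pairwise (· ≤ ·) := by
    have := PySem.List.sorted_pairwise anns (fun x => x)
    simpa using this
  obtain ⟨hA, hB, hC⟩ := runs_facts vals.length vals le_rfl hs
  -- both item lists are (key, anns.count key) over nodup key lists with the same members
  have hkeysperm : (PySem.Set.ofList anns).Perm ((pvRuns vals).map Prod.fst) := by
    rw [List.perm_ext_iff_of_nodup (PySem.Set.nodup_ofList anns) hB]
    intro k
    constructor
    · intro hk
      exact hC k (hsp.mem_iff.mpr ((PySem.Set.mem_ofList anns k).mp hk))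
    · intro hk
      rcases List.mem_map.mp hk with ⟨x, hx, hx1⟩
      exact (PySem.Set.mem_ofList anns k).mpr (hsp.mem_iff.mp (hx1 ▸ (hA x hx).2))
  have hitemsB : ((pvRuns vals).map Prod.fst).map (fun k => (k, (anns.count k : Int)))
      = pvRuns vals := by
    rw [List.map_map]
    have : ∀ x ∈ pvRuns vals, ((fun k => (k, (anns.count k : Int))) ∘ Prod.fst) x = x := by
      intro x hx
      obtain ⟨hx2, _⟩ := hA x hx
      have : vals.count x.1 = anns.count x.1 := hsp.count_eq x.1
      simp only [Function.comp_apply]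
      rw [← this, ← hx2]
    rw [List.map_congr_left this]
    simp
  rw [PySem.Dict.items_counter anns, ← hitemsB]
  exact hkeysperm.map _

-- A's leaf equals B's leaf on every annotation list
theorem leaf_eq (curr_t : List (String × String)) : pvLeafA curr_t = pvLeafB curr_t := by
  by_cases hlen : 2 ≤ curr_t.length
  · unfold pvLeafA pvLeafB
    rw [if_pos hlen, if_pos hlen]
    set anns := curr_t.map (fun a => a.2) with hanns
    set vals := PySem.List.sorted anns (fun x => x) false with hvals
    have hannsne : anns ≠ [] := by
      intro h
      have := List.map_eq_nil_iff.mp h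
      simp [this] at hlen
    -- A side equals pvOut of the counter items
    have hpos : ∀ x ∈ (PySem.Dict.counter anns).items, 0 < x.2 := by
      intro x hx
      rw [PySem.Dict.items_counter] at hx
      rcases List.mem_map.mp hx with ⟨k, hk, hk2⟩
      have hkmem : k ∈ anns := (PySem.Set.mem_ofList _ k).mp hk
      have : 0 < anns.count k := List.count_pos_iff.mpr hkmem
      rw [← hk2]
      simp only []
      exact_mod_cast this
    have hine : (PySem.Dict.counter anns).items ≠ [] := by
      rw [PySem.Dict.items_counter]
      intro h
      rcases List.exists_mem_of_ne_nil _ hannsne with ⟨a, ha⟩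
      have h0 : PySem.Set.ofList anns = [] := List.map_eq_nil_iff.mp h
      have := (PySem.Set.mem_ofList _ a).mpr ha
      simp [h0] at this
    have hA := leafA_core (PySem.Dict.items (PySem.Dict.counter anns)) hine hpos
    -- B side equals pvOut of the runs of sorted anns
    have hvne : vals ≠ [] := by
      rw [hvals, Ne, PySem.List.sorted_eq_nil_iff]
      exact hannsne
    have hrune : ∃ x ∈ pvRuns vals, (0 : Int) < x.2 := by
      match hv : vals with
      | [] => exact absurd rfl hvne
      | v :: t =>
        refine ⟨(v, 1 + ((t.takeWhile (fun w => w == v)).length : Int)), ?_, by positivity⟩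
        rw [pvRuns]
        exact List.mem_cons_self
    have hB : (if (pvScanB vals "\x00" 0 true).2.2 then "\x00"
          else (pvScanB vals "\x00" 0 true).1) = pvOut (pvRuns vals) := by
      rw [scanB_eq_foldl vals.length vals le_rfl, pvScan2_spec, if_pos hrune]
      unfold pvOut
      by_cases h2 : 2 ≤ (pvRuns vals).countP (fun x => x.2 == pvMax (pvRuns vals) 0)
      · simp [h2]
      · simp [h2]
    rw [hA, hB]
    exact pvOut_perm (items_perm_runs anns)
  · unfold pvLeafA pvLeafB
    rw [if_neg hlen, if_neg hlen]

-- ===== VERDICT (by name: the statement is the Claim_ definition above) =====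
theorem get_agreed_anns_spec : Claim_equal_get_agreed_anns := by
  intro ann_dict _
  unfold Spec_get_agreed_anns get_agreed_anns get_agreed_anns_alt
  simp [leaf_eq]
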